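-- pv_equiv track=rewrite | github.com/GHLisz/algorithm-exercises | lintcode/197-permutation-index.py | permutationIndex
-- ===== SOURCE A (Python) =====
-- def permutationIndex(A):
--     # Write your code here
--     index = 1
--     factor = 1
--     for i in range(len(A)-1, -1, -1):
--         smaller_num_count = 0
--         for j in range(i+1, len(A)):
--             if A[i] > A[j]:
--                 smaller_num_count += 1
--         index += factor * smaller_num_count
--         factor *= len(A) - i
--     return index
-- ===== SOURCE B (Python) =====
-- def _bisect_left(a, x):
--     # textbook bisect_left (binary search for leftmost insertion point)
--     lo, hi = 0, len(a)
--     while lo < hi: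
--         mid = (lo + hi) // 2
--         if a[mid] < x:
--             lo = mid + 1
--         else:
--             hi = mid
--     return lo
--
--
-- def permutationIndex(A):
--     # factorial number system via Horner: keep the remaining elements in a
--     # sorted list; the rank of each element is its binary-search position.
--     rem = sorted(A)
--     index = 0
--     for x in A:
--         i = _bisect_left(rem, x)
--         index = index * len(rem) + i
--         rem.pop(i)
--     return index + 1
-- ===== Notes on version B (the rewrite author's own statement) =====
-- stated objective: faster
-- what changed: Replaces the quadratic reverse double loop (count-smaller-to-the-right with an explicit factor accumulator) by a forward Horner evaluation in the factorial number system over a maintained sorted list, where each rank is found by binary search and the element removed.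
import Mathlib
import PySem

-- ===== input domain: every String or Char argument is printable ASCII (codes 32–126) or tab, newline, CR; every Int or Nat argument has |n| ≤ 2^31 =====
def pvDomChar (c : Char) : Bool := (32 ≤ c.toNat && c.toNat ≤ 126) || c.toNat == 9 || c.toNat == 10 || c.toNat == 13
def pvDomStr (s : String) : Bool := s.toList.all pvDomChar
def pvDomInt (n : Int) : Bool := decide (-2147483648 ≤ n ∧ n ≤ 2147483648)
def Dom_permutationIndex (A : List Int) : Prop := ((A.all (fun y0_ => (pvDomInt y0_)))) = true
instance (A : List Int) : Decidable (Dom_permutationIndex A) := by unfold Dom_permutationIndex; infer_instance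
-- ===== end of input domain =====

-- B replaces A's quadratic reverse double loop by a forward Horner pass in the
-- factorial number system over a maintained sorted list (binary-search rank, then removal).

-- ===== PORT A =====
def permutationIndex (A : List Int) : Int :=
  let n : Int := (A.length : Int)
  let st := (PySem.List.pyRange (n - 1) (-1) (-1)).foldl
    (fun (st : Int × Int) i =>
      let smaller := (PySem.List.pyRange (i + 1) n 1).foldl
        (fun c j => if PySem.List.pyGetD A i 0 > PySem.List.pyGetD A j 0 then c + 1 else c)
        (0 : Int)
      (st.1 + st.2 * smaller, st.2 * (n - i)))
    (1, 1)
  st.1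

-- ===== PORT B =====
-- Source B's helper _bisect_left is the textbook bisect_left binary-search loop; its exact
-- port is the prelude's PySem.List.bisectLeft.  rem.pop(i) always has i < len(rem) here
-- (x is in rem throughout, so the insertion point is strictly inside), hence
-- List.eraseIdx is its exact effect.
def permutationIndex_alt (A : List Int) : Int :=
  let st := A.foldl
    (fun (st : List Int × Int) x =>
      let rem := st.1
      let i := PySem.List.bisectLeft rem x
      (rem.eraseIdx i, st.2 * (rem.length : Int) + (i : Int)))
    (PySem.List.sorted A (fun v => v), 0)
  st.2 + 1

-- ===== PRECONDITION & SPEC =====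
def Spec_permutationIndex (A : List Int) (out : Int) : Prop := out = permutationIndex_alt A
instance (A : List Int) (out : Int) : Decidable (Spec_permutationIndex A out) := by unfold Spec_permutationIndex; infer_instance

-- ===== CLAIM (what is proved, stated in full; the proofs are below) =====
def Claim_equal_permutationIndex : Prop := ∀ (A : List Int), Dom_permutationIndex A → Spec_permutationIndex A (permutationIndex A)

-- ===== LEMMAS AND PROOFS =====

-- factorial, as an Int
def pvFact : Nat → Int
  | 0 => 1
  | n + 1 => (n + 1 : Int) * pvFact n

-- number of elements to the right of position i that are smaller than A[i]
def pvCnt (A : List Int) (i : Nat) : Int :=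
  ((A.drop (i + 1)).countP (fun y => A.getD i 0 > y) : Int)

-- value accumulated by A's outer loop over i = k-1 … 0
def pvW (A : List Int) : Nat → Int
  | 0 => 0
  | k + 1 => pvCnt A k + ((A.length : Int) - (k : Int)) * pvW A k

-- A's factor accumulator after processing i = k-1 … 0
def pvP (A : List Int) : Nat → Int
  | 0 => 1
  | k + 1 => ((A.length : Int) - (k : Int)) * pvP A k

-- structural (head-peeling) form of the permutation index minus one
def pvIdx : List Int → Int
  | [] => 0
  | x :: r => (r.countP (fun y => x > y) : Int) * pvFact r.length + pvIdx r

-- explicit partial sum Σ_{i<k} cnt_i · (n-1-i)!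
def pvS (A : List Int) (k : Nat) : Int :=
  ((List.range k).map (fun i => pvCnt A i * pvFact (A.length - 1 - i))).sum

-- A's inner loop is a countP over the suffix
theorem pvInner (A : List Int) (i : Int) (hi : 0 ≤ i) :
    (PySem.List.pyRange (i + 1) (A.length : Int) 1).foldl
      (fun c j => if PySem.List.pyGetD A i 0 > PySem.List.pyGetD A j 0 then c + 1 else c)
      (0 : Int)
    = ((A.drop (i + 1).toNat).countP (fun y => PySem.List.pyGetD A i 0 > y) : Int) := by
  rw [PySem.List.foldl_pyRange_pyGetD' A 0
    (fun c y => if PySem.List.pyGetD A i 0 > y then c + 1 else c) 0 (a := i + 1) (by omega)]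
  rw [PySem.List.foldl_ite_add_one]
  simp

-- A's outer loop over i = k-1 … 0, characterised by pvW / pvP
theorem pvALoop (A : List Int) (k : Nat) (hk : k ≤ A.length) : ∀ (idx fac : Int),
    (PySem.List.pyRange ((k : Int) - 1) (-1) (-1)).foldl
      (fun (st : Int × Int) i =>
        let smaller := (PySem.List.pyRange (i + 1) (A.length : Int) 1).foldl
          (fun c j => if PySem.List.pyGetD A i 0 > PySem.List.pyGetD A j 0 then c + 1 else c)
          (0 : Int)
        (st.1 + st.2 * smaller, st.2 * ((A.length : Int) - i)))
      (idx, fac)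
    = (idx + fac * pvW A k, fac * pvP A k) := by
  induction k with
  | zero =>
    intro idx fac
    rw [show ((0 : Nat) : Int) - 1 = -1 by norm_num, PySem.List.pyRange_neg_one_eq_nil (by omega)]
    simp [pvW, pvP]
  | succ k ih =>
    intro idx fac
    rw [show ((k + 1 : Nat) : Int) - 1 = (k : Int) by push_cast; ring]
    rw [PySem.List.pyRange_neg_one_cons (by omega)]
    rw [List.foldl_cons]
    simp only
    rw [pvInner A (k : Int) (by omega)]
    rw [ih (by omega)]
    have hc : ((A.drop ((k : Int) + 1).toNat).countP
        (fun y => PySem.List.pyGetD A (k : Int) 0 > y) : Int) = pvCnt A k := by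
      simp [pvCnt]
    rw [hc]
    show (idx + fac * pvCnt A k + fac * ((A.length : Int) - k) * pvW A k,
          fac * ((A.length : Int) - (k : Int)) * pvP A k) = _
    simp only [pvW, pvP, Prod.mk.injEq]
    constructor <;> ring

-- pvW against the explicit weighted sum
theorem pvWS (A : List Int) (k : Nat) (hk : k ≤ A.length) :
    pvFact (A.length - k) * pvW A k = pvS A k := by
  induction k with
  | zero => simp [pvW, pvS]
  | succ k ih =>
    have e : A.length - k = (A.length - (k + 1)) + 1 := by omega
    have hfac : ((A.length : Int) - k) * pvFact (A.length - (k + 1)) = pvFact (A.length - k) := by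
      rw [e, pvFact]
      have : ((A.length : Int) - k) = ((A.length - (k + 1) : Nat) : Int) + 1 := by omega
      rw [this]
    have hsum : pvS A (k + 1) = pvS A k + pvCnt A k * pvFact (A.length - 1 - k) := by
      simp [pvS, List.range_succ]
    have he2 : A.length - 1 - k = A.length - (k + 1) := by omega
    rw [hsum, ← ih (by omega), pvW, he2]
    linear_combination pvW A k * hfac

-- the structural form against the same sum
theorem pvIdxS (A : List Int) : pvIdx A = pvS A A.length := by
  induction A with
  | nil => simp [pvIdx, pvS]
  | cons x r ih =>
    rw [pvIdx, ih]
    simp only [pvS, List.length_cons, List.range_succ_eq_map, List.map_cons, List.map_map,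
      List.sum_cons]
    have h0 : pvCnt (x :: r) 0 = (r.countP (fun y => x > y) : Int) := by
      simp [pvCnt]
    have hfun : ∀ i, ((fun i => pvCnt (x :: r) i * pvFact (r.length + 1 - 1 - i)) ∘ Nat.succ) i
        = pvCnt r i * pvFact (r.length - 1 - i) := by
      intro i
      simp only [Function.comp_apply, pvCnt]
      have : r.length + 1 - 1 - Nat.succ i = r.length - 1 - i := by omega
      rw [this]
      simp
    rw [List.map_congr_left (fun i _ => hfun i)]
    simp [h0]

-- bisect_left on a sorted list is the count of strictly smaller elements
theorem pvBisectCount (rem : List Int) (x : Int) (hs : rem.Pairwise (· ≤ ·)) :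
    PySem.List.bisectLeft rem x = rem.countP (fun y => y < x) := by
  obtain ⟨hle, hlt, hge⟩ := PySem.List.bisectLeft_spec rem x hs
  set i := PySem.List.bisectLeft rem x with hi
  have h1 : (rem.take i).countP (fun y => y < x) = (rem.take i).length := by
    rw [List.countP_eq_length]
    intro y hy
    rw [List.mem_take_iff_getElem] at hy
    obtain ⟨j, hj, rfl⟩ := hy
    have hj' : j < rem.length := by omega
    have hgoal := hlt j hj' (by omega)
    simpa using hgoal
  have h2 : (rem.drop i).countP (fun y => y < x) = 0 := by
    rw [List.countP_eq_zero]
    intro y hy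
    rw [List.mem_iff_getElem] at hy
    obtain ⟨j, hj, rfl⟩ := hy
    have hj2 : i + j < rem.length := by
      simp [List.length_drop] at hj; omega
    have := hge (i + j) hj2 (by omega)
    simp only [List.getElem_drop]
    simp; omega
  have hsplit : rem.countP (fun y => y < x)
      = (rem.take i).countP (fun y => y < x) + (rem.drop i).countP (fun y => y < x) := by
    rw [← List.countP_append, List.take_append_drop]
  rw [hsplit, h1, h2, List.length_take]
  omega

-- B's loop: rank-and-remove over any sorted rearrangement of s computes pvIdx s
theorem pvBLoop (s : List Int) : ∀ (rem : List Int) (acc : Int),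
    rem.Perm s → rem.Pairwise (· ≤ ·) →
    (s.foldl
      (fun (st : List Int × Int) x =>
        let rem := st.1
        let i := PySem.List.bisectLeft rem x
        (rem.eraseIdx i, st.2 * (rem.length : Int) + (i : Int)))
      (rem, acc)).2
    = acc * pvFact s.length + pvIdx s := by
  induction s with
  | nil =>
    intro rem acc _ _
    simp [pvFact, pvIdx]
  | cons x t ih =>
    intro rem acc hperm hs
    have hx : x ∈ rem := hperm.mem_iff.2 (List.mem_cons_self)
    have hcount : rem.countP (fun y => y < x) = t.countP (fun y => y < x) := by
      rw [hperm.countP_eq]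
      simp
    have hib := pvBisectCount rem x hs
    set i := PySem.List.bisectLeft rem x with hidef
    obtain ⟨l1, l2, hsplit⟩ := List.append_of_mem hx
    have hilt : i < rem.length := by
      have : rem.countP (fun y => y < x) < rem.length := by
        rw [hsplit]
        simp [List.countP_append]
        have c1 := List.countP_le_length (l := l1) (p := fun y => decide (y < x))
        have c2 := List.countP_le_length (l := l2) (p := fun y => decide (y < x))
        omega
      omega
    obtain ⟨p, hp, hpx⟩ := List.mem_iff_getElem.1 hx
    obtain ⟨_, hlt, hge⟩ := PySem.List.bisectLeft_spec rem x hs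
    have hix : rem[i] = x := by
      have hxle : x ≤ rem[i] := hge i hilt (le_refl _)
      have hip : i ≤ p := by
        by_contra h
        have := hlt p hp (by omega)
        omega
      rcases eq_or_lt_of_le hip with h | h
      · simp only [← h] at hpx; exact hpx
      · have hmono : rem[i] ≤ rem[p] := List.pairwise_iff_getElem.1 hs i p hilt hp h
        omega
    have hperm2 : rem.Perm (x :: rem.eraseIdx i) := by
      conv_lhs => rw [← List.take_append_drop i rem, List.drop_eq_getElem_cons hilt, hix]
      rw [List.eraseIdx_eq_take_drop_succ]
      exact List.perm_middle
    have hpt : (rem.eraseIdx i).Perm t :=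
      ((hperm2.symm.trans hperm).cons_inv)
    have hst : (rem.eraseIdx i).Pairwise (· ≤ ·) :=
      hs.sublist (List.eraseIdx_sublist rem i)
    rw [List.foldl_cons]
    simp only
    rw [← hidef, ih (rem.eraseIdx i) _ hpt hst]
    have hlen : rem.length = t.length + 1 := by
      rw [hperm.length_eq]; simp
    rw [hlen]
    have hival : (i : Int) = (t.countP (fun y => x > y) : Int) := by
      rw [hib, hcount]
    rw [hival]
    simp only [pvIdx, List.length_cons, pvFact]
    push_cast
    ring

-- ===== VERDICT (by name: the statement is the Claim_ definition above) =====
theorem permutationIndex_spec : Claim_equal_permutationIndex := by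
  intro A _
  unfold Spec_permutationIndex
  simp only [permutationIndex, permutationIndex_alt]
  rw [pvALoop A A.length (le_refl _) 1 1]
  rw [pvBLoop A (PySem.List.sorted A (fun v => v)) 0 (PySem.List.sorted_perm A (fun v => v) false)
    (by simpa using PySem.List.sorted_pairwise A (fun v => v))]
  have hW : pvW A A.length = pvIdx A := by
    have h := pvWS A A.length (le_refl _)
    simp [pvFact] at h
    rw [h, pvIdxS]
  rw [hW]
  ring
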